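-- pv_equiv track=rewrite | github.com/itsluminous/LeetCode | 2191-sort-the-jumbled-numbers/2191-sort-the-jumbled-numbers.py | sortJumbled
-- ===== SOURCE A (Python) =====
-- from typing import List
--
-- def sortJumbled(mapping: List[int], nums: List[int]) -> List[int]:
--     n = len(nums)
--
--     # create a mapped array
--     mapped = []
--     for num in nums:
--         numMap, mul = 0, 1
--         while num > 9:
--             numMap += mul * mapping[num % 10]
--             num //= 10
--             mul *= 10
--         numMap += mul * mapping[num % 10]
--         mapped.append(numMap)
--
--     # sort the indexes as per mapped value
--     indices = list(range(n))
--     indices.sort(key=lambda i: mapped[i])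
--
--     # return the sorted nums
--     sorted_nums = [nums[i] for i in indices]
--     return sorted_nums
-- ===== SOURCE B (Python) =====
-- from typing import List
--
-- def sortJumbled(mapping: List[int], nums: List[int]) -> List[int]:
--     def key(num: int) -> int:
--         if num <= 9:
--             return mapping[num % 10]
--         return key(num // 10) * 10 + mapping[num % 10]
--     return sorted(nums, key=key)
-- ===== Notes on version B (the rewrite author's own statement) =====
-- stated objective: idiomatic
-- what changed: A builds a mapped-key array with an iterative least-significant-digit accumulator loop, sorts an explicit index array by mapped[i] and gathers nums through it; B sorts nums directly with sorted(nums, key=...) using a recursive Horner (most-significant-digit-first) key, relying on sort stability instead of the index array.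
import Mathlib
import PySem

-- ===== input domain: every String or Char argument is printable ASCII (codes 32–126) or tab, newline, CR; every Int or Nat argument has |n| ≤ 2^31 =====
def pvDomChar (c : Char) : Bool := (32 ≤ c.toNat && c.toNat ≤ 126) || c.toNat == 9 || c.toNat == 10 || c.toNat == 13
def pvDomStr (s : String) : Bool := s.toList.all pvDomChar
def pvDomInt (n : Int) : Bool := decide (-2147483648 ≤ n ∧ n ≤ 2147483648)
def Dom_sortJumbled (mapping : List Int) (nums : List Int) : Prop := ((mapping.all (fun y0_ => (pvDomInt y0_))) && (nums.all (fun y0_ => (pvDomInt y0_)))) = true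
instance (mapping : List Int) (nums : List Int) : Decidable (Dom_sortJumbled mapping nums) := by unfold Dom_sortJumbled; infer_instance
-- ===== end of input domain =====

-- B replaces A's index-array sort (explicit LSB digit loop building `mapped`, sorting range(n) by
-- mapped[i], then gathering) with a direct stable `sorted(nums, key=...)` whose key is a recursive
-- MSB-first Horner evaluation of the mapped digits; same return value on Pre_ (idiomatic rewrite).


-- termination helper used by both ports' digit recursions
theorem pvDiv10Lt {num : Int} (h : 9 < num) : (PySem.Int.floordiv num 10).toNat < num.toNat := by
  rw [PySem.Int.floordiv_eq_ediv_of_pos (by norm_num)]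
  omega

-- ===== PORT A =====
-- the inner while-loop of A: numMap, mul accumulate; num is consumed LSB first
def mapLoopA (mapping : List Int) (num numMap mul : Int) : Int :=
  if h : 9 < num then
    mapLoopA mapping (PySem.Int.floordiv num 10)
      (numMap + mul * PySem.List.pyGetD mapping (PySem.Int.mod num 10) 0) (mul * 10)
  else
    numMap + mul * PySem.List.pyGetD mapping (PySem.Int.mod num 10) 0
termination_by num.toNat
decreasing_by exact pvDiv10Lt h

def sortJumbled (mapping : List Int) (nums : List Int) : List Int :=
  let n := PySem.List.len nums
  let mapped := nums.foldl (fun acc num => acc ++ [mapLoopA mapping num 0 1]) []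
  let indices := PySem.List.pyRange 0 n 1
  let indices := PySem.List.sorted indices (fun i => PySem.List.pyGetD mapped i 0) false
  indices.map (fun i => PySem.List.pyGetD nums i 0)

-- ===== PORT B =====
-- B's recursive key: MSB-first Horner evaluation of the digit-mapped number
def keyB (mapping : List Int) (num : Int) : Int :=
  if h : num ≤ 9 then
    PySem.List.pyGetD mapping (PySem.Int.mod num 10) 0
  else
    keyB mapping (PySem.Int.floordiv num 10) * 10 + PySem.List.pyGetD mapping (PySem.Int.mod num 10) 0
termination_by num.toNat
decreasing_by exact pvDiv10Lt (by omega)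

def sortJumbled_alt (mapping : List Int) (nums : List Int) : List Int :=
  PySem.List.sorted nums (keyB mapping) false

-- ===== PRECONDITION & SPEC =====
-- Pre_ excludes exactly the inputs where some accessed digit is ≥ len(mapping), on which both
-- A and B raise IndexError in Python (for x < 0 both read the single digit x % 10).
def Pre_sortJumbled (mapping : List Int) (nums : List Int) : Prop :=
  ∀ x ∈ nums,
    (0 ≤ x → 0 < mapping.length ∧ ∀ d ∈ Nat.digits 10 x.toNat, d < mapping.length) ∧
    (x < 0 → (x % 10).toNat < mapping.length)
instance (mapping : List Int) (nums : List Int) : Decidable (Pre_sortJumbled mapping nums) := by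
  unfold Pre_sortJumbled; infer_instance

def pvWitness_sortJumbled : List Int × List Int :=
  ([8, 9, 4, 0, 2, 1, 3, 5, 7, 6], [991, 338, -38, 0])

def Spec_sortJumbled (mapping : List Int) (nums : List Int) (out : List Int) : Prop := out = sortJumbled_alt mapping nums
instance (mapping : List Int) (nums : List Int) (out : List Int) : Decidable (Spec_sortJumbled mapping nums out) := by unfold Spec_sortJumbled; infer_instance

-- ===== CLAIM (what is proved, stated in full; the proofs are below) =====
def Claim_equal_sortJumbled : Prop := ∀ (mapping : List Int) (nums : List Int), Dom_sortJumbled mapping nums → Pre_sortJumbled mapping nums → Spec_sortJumbled mapping nums (sortJumbled mapping nums)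

-- ===== LEMMAS AND PROOFS =====

-- A's accumulator loop computes numMap + mul · (B's Horner key), for every num
theorem mapLoopA_eq_keyB (mapping : List Int) :
    ∀ (n : Nat) (num : Int), num.toNat = n →
      ∀ numMap mul, mapLoopA mapping num numMap mul = numMap + mul * keyB mapping num := by
  intro n
  induction n using Nat.strong_induction_on with
  | _ n ih =>
    intro num hn numMap mul
    rw [mapLoopA, keyB]
    by_cases h9 : 9 < num
    · rw [dif_pos h9, dif_neg (by omega : ¬ num ≤ 9)]
      rw [ih _ (hn ▸ pvDiv10Lt h9) _ rfl]
      ring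
    · rw [dif_neg h9, dif_pos (by omega : num ≤ 9)]

-- mapping the lookup g over an insertion commutes with inserting the looked-up value,
-- as long as key1 agrees with k ∘ g on every element involved (stability transfer, one step)
theorem insertBy_map_comm (g k key1 : Int → Int) (x : Int) (ys : List Int)
    (hx : key1 x = k (g x)) (hys : ∀ y ∈ ys, key1 y = k (g y)) :
    (PySem.List.insertBy (fun a b => decide (key1 a < key1 b)) x ys).map g
      = PySem.List.insertBy (fun a b => decide (k a < k b)) (g x) (ys.map g) := by
  induction ys with
  | nil => rfl
  | cons y ys ih =>
    have hy : key1 y = k (g y) := hys y (by simp)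
    show (if decide (key1 x < key1 y) then x :: y :: ys
          else y :: PySem.List.insertBy (fun a b => decide (key1 a < key1 b)) x ys).map g
        = if decide (k (g x) < k (g y)) then g x :: g y :: ys.map g
          else g y :: PySem.List.insertBy (fun a b => decide (k a < k b)) (g x) (ys.map g)
    rw [hx, hy]
    by_cases hlt : k (g x) < k (g y)
    · simp [hlt]
    · simp only [hlt, decide_false, Bool.false_eq_true, if_false, List.map_cons]
      rw [ih (fun z hz => hys z (by simp [hz]))]

-- the whole insertion-sort fold transfers along g (stability transfer, folded)
theorem foldl_insertBy_map (g k key1 : Int → Int) :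
    ∀ (is acc : List Int), (∀ i ∈ is, key1 i = k (g i)) → (∀ j ∈ acc, key1 j = k (g j)) →
      (is.foldl (fun acc x => PySem.List.insertBy (fun a b => decide (key1 a < key1 b)) x acc) acc).map g
        = (is.map g).foldl (fun acc v => PySem.List.insertBy (fun a b => decide (k a < k b)) v acc) (acc.map g) := by
  intro is
  induction is with
  | nil => intro acc _ _; rfl
  | cons i is ih =>
    intro acc his hacc
    simp only [List.foldl_cons, List.map_cons]
    have hi : key1 i = k (g i) := his i (by simp)
    have hacc' : ∀ j ∈ PySem.List.insertBy (fun a b => decide (key1 a < key1 b)) i acc,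
        key1 j = k (g j) := by
      intro j hj
      rcases (PySem.List.mem_insertBy _ _ _ _).1 hj with h | h
      · exact h ▸ hi
      · exact hacc j h
    rw [ih _ (fun j hj => his j (by simp [hj])) hacc', insertBy_map_comm g k key1 i acc hi hacc]

-- the key A assigns to index i equals B's key of nums[i], for i in range(len(nums))
theorem mapped_key_eq (mapping nums : List Int) (i : Int) (hi : i ∈ PySem.List.pyRange 0 (PySem.List.len nums) 1) :
    PySem.List.pyGetD (nums.foldl (fun acc num => acc ++ [mapLoopA mapping num 0 1]) []) i 0
      = keyB mapping (PySem.List.pyGetD nums i 0) := by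
  have hmem := (PySem.List.mem_pyRange_one).1 hi
  have hlen : (PySem.List.len nums) = (nums.length : Int) := by simp [PySem.List.len_eq]
  have h0 : 0 ≤ i := hmem.1
  have hilt : i < (nums.length : Int) := by rw [← hlen]; exact hmem.2
  have hmap : nums.foldl (fun acc num => acc ++ [mapLoopA mapping num 0 1]) []
      = nums.map (fun num => mapLoopA mapping num 0 1) := by
    simpa using PySem.List.foldl_append_singleton_eq_map (fun num => mapLoopA mapping num 0 1) nums []
  rw [hmap]
  rw [PySem.List.pyGetD_eq_getElem (nums.map (fun num => mapLoopA mapping num 0 1)) 0 h0 (by simpa using hilt),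
      PySem.List.pyGetD_eq_getElem nums 0 h0 hilt]
  simp only [List.getElem_map]
  rw [mapLoopA_eq_keyB mapping (nums[i.toNat]).toNat _ rfl]
  ring

-- ===== VERDICT (by name: the statement is the Claim_ definition above) =====
theorem sortJumbled_spec : Claim_equal_sortJumbled := by
  intro mapping nums _hdom _hpre
  unfold Spec_sortJumbled sortJumbled sortJumbled_alt
  dsimp only
  rw [PySem.List.sorted_eq_foldl_insertBy, PySem.List.sorted_eq_foldl_insertBy]
  have := foldl_insertBy_map (fun i => PySem.List.pyGetD nums i 0) (keyB mapping)
    (fun i => PySem.List.pyGetD (nums.foldl (fun acc num => acc ++ [mapLoopA mapping num 0 1]) []) i 0)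
    (PySem.List.pyRange 0 (PySem.List.len nums) 1) []
    (fun i hi => mapped_key_eq mapping nums i hi) (by intro j hj; cases hj)
  rw [PySem.List.map_pyGetD_pyRange_zero nums 0] at this
  exact this
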